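-- pv_equiv track=rewrite | github.com/devamateur/coding-test-practice | 프로그래머스/2/12973. 짝지어 제거하기/짝지어 제거하기.py | solution
-- ===== SOURCE A (Python) =====
-- def solution(s):
--     answer = -1
--
--     stack = []
--
--     for i in range(len(s)):
--         stack.append(s[i])
--
--         if len(stack) >= 2:
--             top1, top2 = stack[-1], stack[-2]
--             if top1 == top2:
--                 stack.pop()
--                 stack.pop()
--
--     answer = 1 if len(stack) == 0 else 0
--
--     return answer
-- ===== SOURCE B (Python) =====
-- def solution(s):
--     chars = list(s)
--     changed = True
--     while changed:
--         changed = False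
--         i = 0
--         while i + 1 < len(chars):
--             if chars[i] == chars[i + 1]:
--                 del chars[i:i + 2]
--                 changed = True
--                 if i > 0:
--                     i -= 1
--             else:
--                 i += 1
--     return 1 if len(chars) == 0 else 0
-- ===== Notes on version B (the rewrite author's own statement) =====
-- stated objective: alternative
-- what changed: Replaces the single left-to-right stack pass with in-place repeated adjacent-pair elimination: scan the char list, delete the first equal adjacent pair, step the index back one, and repeat outer passes until a scan finds no pair.
import Mathlib
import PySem

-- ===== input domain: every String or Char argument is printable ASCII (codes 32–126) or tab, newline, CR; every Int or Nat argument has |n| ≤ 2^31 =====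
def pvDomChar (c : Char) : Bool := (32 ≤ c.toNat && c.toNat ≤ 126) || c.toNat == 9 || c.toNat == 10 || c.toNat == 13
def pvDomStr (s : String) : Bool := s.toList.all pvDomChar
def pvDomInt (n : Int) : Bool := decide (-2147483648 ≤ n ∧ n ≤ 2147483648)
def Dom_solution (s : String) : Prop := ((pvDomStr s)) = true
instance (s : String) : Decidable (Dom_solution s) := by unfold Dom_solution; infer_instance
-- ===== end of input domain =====

-- B is an alternative (nested-pass, in-place) algorithm, not claimed faster; equivalence of return values is proved below.

-- ===== PORT A =====
-- one left-to-right pass: push each char, pop the top two whenever they are equal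
def solution (s : String) : Int :=
  let stack := s.toList.foldl (fun stack c =>
    let stack := stack ++ [c]
    if 2 ≤ stack.length then
      match PySem.List.pyGet? stack (-1), PySem.List.pyGet? stack (-2) with
      | some top1, some top2 =>
        if top1 = top2 then stack.dropLast.dropLast else stack
      | _, _ => stack
    else stack) []
  if stack.length = 0 then 1 else 0

-- ===== PORT B =====
-- inner while loop of Source B: scan for an equal adjacent pair, delete it in place, step back one.
-- fuel is only a structural totality guard: l.length - i steps always suffice (see pvInner_eq).
def pvInner (fuel : Nat) (l : List Char) (i : Nat) (changed : Bool) : List Char × Bool :=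
  match fuel with
  | 0 => (l, changed)
  | fuel + 1 =>
    if h : i + 1 < l.length then
      if l[i]'(Nat.lt_of_succ_lt h) = l[i + 1]'h then
        pvInner fuel (l.take i ++ l.drop (i + 2)) (if 0 < i then i - 1 else i) true
      else
        pvInner fuel l (i + 1) changed
    else (l, changed)

-- outer while-changed loop of Source B (fuel again only a totality guard: length+1 passes suffice)
def pvOuter (fuel : Nat) (l : List Char) : List Char :=
  match fuel with
  | 0 => l
  | fuel + 1 =>
    let r := pvInner l.length l 0 false
    if r.2 then pvOuter fuel r.1 else r.1

def solution_alt (s : String) : Int :=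
  let chars := pvOuter (s.toList.length + 1) s.toList
  if chars.length = 0 then 1 else 0

-- ===== PRECONDITION & SPEC =====
def Spec_solution (s : String) (out : Int) : Prop := out = solution_alt s
instance (s : String) (out : Int) : Decidable (Spec_solution s out) := by unfold Spec_solution; infer_instance

-- ===== CLAIM (what is proved, stated in full; the proofs are below) =====
def Claim_equal_solution : Prop := ∀ (s : String), Dom_solution s → Spec_solution s (solution s)

-- ===== LEMMAS AND PROOFS =====

-- the abstract one-char stack step: pop if the new char equals the top, else push
def stepS (st : List Char) (c : Char) : List Char :=
  if st.getLast? = some c then st.dropLast else st ++ [c]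

theorem stepA_eq (st : List Char) (c : Char) :
    (let st' := st ++ [c]
     if 2 ≤ st'.length then
       match PySem.List.pyGet? st' (-1), PySem.List.pyGet? st' (-2) with
       | some top1, some top2 => if top1 = top2 then st'.dropLast.dropLast else st'
       | _, _ => st'
     else st') = stepS st c := by
  cases st with
  | nil => simp [stepS]
  | cons a t =>
    have hlen : 2 ≤ ((a :: t) ++ [c]).length := by simp
    have h1 : PySem.List.pyGet? ((a :: t) ++ [c]) (-1) = some c :=
      PySem.List.pyGet?_neg_one_append_singleton _ _
    have h2 : PySem.List.pyGet? ((a :: t) ++ [c]) (-2) = (a :: t).getLast? := by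
      rw [PySem.List.pyGet?_neg_ofNat _ 2 (by omega) (by simp)]
      have hl : ((a :: t) ++ [c]).length - 2 = (a :: t).length - 1 := by simp
      rw [hl, List.getElem?_append_left (by simp), List.getLast?_eq_getElem?]
    obtain ⟨x, hx⟩ : ∃ x, (a :: t).getLast? = some x := by
      cases hgl : (a :: t).getLast? with
      | none => simp at hgl
      | some y => exact ⟨y, rfl⟩
    simp only [hlen, if_true, h1, h2, hx, stepS]
    by_cases he : c = x
    · subst he
      rw [if_pos (rfl : (some c : Option Char) = some c), if_pos (rfl : c = c)]
      show ((a :: t) ++ [c]).dropLast.dropLast = (a :: t).dropLast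
      rw [List.dropLast_concat]
    · rw [if_neg he, if_neg (by simpa using Ne.symm he)]

theorem foldl_stepS_take1 (m : List Char) :
    List.foldl stepS [] m = List.foldl stepS (m.take 1) (m.drop 1) := by
  cases m with
  | nil => rfl
  | cons c t => simp [stepS]

theorem pairfree_stepS {st : List Char} (c : Char) (h : List.IsChain (· ≠ ·) st) :
    List.IsChain (· ≠ ·) (stepS st c) := by
  unfold stepS
  split
  · exact h.dropLast
  · rename_i hne
    refine h.append (List.isChain_singleton c) ?_
    intro x hx y hy
    simp only [List.head?_cons, Option.mem_def, Option.some.injEq] at hy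
    intro hxy
    exact hne (by rw [hx, hxy, hy])

theorem pairfree_foldl (T : List Char) : ∀ st : List Char, List.IsChain (· ≠ ·) st →
    List.IsChain (· ≠ ·) (List.foldl stepS st T) := by
  induction T with
  | nil => intro st h; exact h
  | cons c t ih => intro st h; exact ih _ (pairfree_stepS c h)

theorem take_succ_concat (l : List Char) (i : Nat) (h : i < l.length) :
    l.take (i + 1) = l.take i ++ [l[i]'h] := by
  rw [List.take_add_one]
  simp [List.getElem?_eq_getElem h]

theorem getLast?_take_succ (l : List Char) (i : Nat) (h : i < l.length) :
    (l.take (i + 1)).getLast? = some (l[i]'h) := by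
  rw [take_succ_concat l i h, List.getLast?_concat]

theorem pairfree_take_one (m : List Char) : List.IsChain (· ≠ ·) (m.take 1) := by
  cases m <;> simp

theorem pvInner_eq (fuel : Nat) : ∀ (l : List Char) (i : Nat) (ch : Bool),
    l.length - i ≤ fuel → List.IsChain (· ≠ ·) (l.take (i + 1)) →
    (pvInner fuel l i ch).1 = List.foldl stepS (l.take (i + 1)) (l.drop (i + 1)) := by
  induction fuel with
  | zero =>
    intro l i ch hf _
    have h1 : l.take (i + 1) = l := List.take_of_length_le (by omega)
    have h2 : l.drop (i + 1) = [] := List.drop_eq_nil_of_le (by omega)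
    rw [h1, h2]
    rfl
  | succ fuel ih =>
    intro l i ch hf hpf
    show (if h : i + 1 < l.length then _ else (l, ch)).1 = _
    split
    · rename_i h
      have hi1 : i < l.length := by omega
      have hdrop : l.drop (i + 1) = l[i + 1]'h :: l.drop (i + 2) :=
        (List.drop_eq_getElem_cons h).symm ▸ rfl
      have hdl : (l.take (i + 1)).dropLast = l.take i := by
        rw [take_succ_concat l i hi1, List.dropLast_concat]
      split
      · rename_i heq
        have hlast : (l.take (i + 1)).getLast? = some (l[i + 1]'h) := by
          rw [getLast?_take_succ l i hi1, heq]
        have hpop : stepS (l.take (i + 1)) (l[i + 1]'h) = l.take i := by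
          unfold stepS
          rw [if_pos hlast, hdl]
        by_cases hi : 0 < i
        · have hlen' : (l.take i).length = i := by simp; omega
          have htake : (l.take i ++ l.drop (i + 2)).take ((i - 1) + 1) = l.take i := by
            have hii : (i - 1) + 1 = i := by omega
            rw [hii]
            exact List.take_left' hlen'
          have hdrop' : (l.take i ++ l.drop (i + 2)).drop ((i - 1) + 1) = l.drop (i + 2) := by
            have hii : (i - 1) + 1 = i := by omega
            rw [hii]
            exact List.drop_left' hlen'
          have hpf' : List.IsChain (· ≠ ·) ((l.take i ++ l.drop (i + 2)).take ((i - 1) + 1)) := by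
            rw [htake, ← hdl]
            exact hpf.dropLast
          have hf' : (l.take i ++ l.drop (i + 2)).length - (i - 1) ≤ fuel := by
            simp only [List.length_append, List.length_take, List.length_drop]
            omega
          simp only [hi, if_pos]
          rw [ih _ _ _ hf' hpf', htake, hdrop', hdrop, List.foldl_cons, hpop]
        · have hi0 : i = 0 := by omega
          subst hi0
          have hf' : (l.drop 2).length - 0 ≤ fuel := by simp; omega
          have hpf0 : List.IsChain (· ≠ ·) ((l.drop 2).take (0 + 1)) := pairfree_take_one _
          simp only [Nat.lt_irrefl, if_false, List.take_zero, List.nil_append]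
          rw [ih _ _ _ hf' hpf0, hdrop, List.foldl_cons, hpop]
          simp only [List.take_zero]
          simpa using (foldl_stepS_take1 (l.drop 2)).symm
      · rename_i heq
        have hlast : (l.take (i + 1)).getLast? = some (l[i]'hi1) := getLast?_take_succ l i hi1
        have hpush : stepS (l.take (i + 1)) (l[i + 1]'h) = l.take (i + 2) := by
          unfold stepS
          rw [if_neg (by rw [hlast]; simpa using heq), ← take_succ_concat l (i + 1) h]
        have hpf' : List.IsChain (· ≠ ·) (l.take (i + 2)) := by
          rw [← hpush]
          exact pairfree_stepS _ hpf
        rw [ih _ _ _ (by omega) hpf', List.drop_eq_getElem_cons h, List.foldl_cons, hpush]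
    · rename_i h
      have h1 : l.take (i + 1) = l := List.take_of_length_le (by omega)
      have h2 : l.drop (i + 1) = [] := List.drop_eq_nil_of_le (by omega)
      rw [h1, h2]
      rfl

theorem pvInner_id (fuel : Nat) : ∀ (l : List Char) (i : Nat) (ch : Bool),
    List.IsChain (· ≠ ·) l → pvInner fuel l i ch = (l, ch) := by
  induction fuel with
  | zero => intro l i ch _; rfl
  | succ fuel ih =>
    intro l i ch hpf
    show (if h : i + 1 < l.length then _ else (l, ch)) = (l, ch)
    split
    · rename_i h
      rw [if_neg (List.isChain_iff_getElem.mp hpf i h)]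
      exact ih l (i + 1) ch hpf
    · rfl

theorem pvInner_shrink (fuel : Nat) : ∀ (l : List Char) (i : Nat) (ch : Bool),
    pvInner fuel l i ch = (l, ch) ∨ (pvInner fuel l i ch).1.length < l.length := by
  induction fuel with
  | zero => intro l i ch; left; rfl
  | succ fuel ih =>
    intro l i ch
    show (if h : i + 1 < l.length then _ else (l, ch)) = (l, ch) ∨
      ((if h : i + 1 < l.length then _ else (l, ch)) : List Char × Bool).1.length < l.length
    split
    · rename_i h
      split
      · have hlen : (l.take i ++ l.drop (i + 2)).length < l.length := by
          simp only [List.length_append, List.length_take, List.length_drop]; omega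
        rcases ih (l.take i ++ l.drop (i + 2)) (if 0 < i then i - 1 else i) true with he | hlt
        · right; rw [he]; exact hlen
        · right; omega
      · exact ih l (i + 1) ch
    · left; rfl

theorem pvOuter_eq (l : List Char) :
    pvOuter (l.length + 1) l = List.foldl stepS [] l := by
  have h1 : (pvInner l.length l 0 false).1 = List.foldl stepS [] l := by
    rw [pvInner_eq l.length l 0 false (by omega) (by simpa using pairfree_take_one l)]
    simpa using (foldl_stepS_take1 l).symm
  have hN : List.IsChain (· ≠ ·) (List.foldl stepS [] l) :=
    pairfree_foldl l [] List.isChain_nil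
  show (if (pvInner l.length l 0 false).2 then pvOuter l.length (pvInner l.length l 0 false).1
       else (pvInner l.length l 0 false).1) = _
  by_cases h2 : (pvInner l.length l 0 false).2 = true
  · rw [if_pos h2, h1]
    rcases pvInner_shrink l.length l 0 false with he | hlt
    · rw [he] at h2; simp at h2
    · obtain ⟨m, hm⟩ : ∃ m, l.length = m + 1 := ⟨l.length - 1, by omega⟩
      rw [hm]
      show (if (pvInner _ _ 0 false).2 then _ else (pvInner _ _ 0 false).1) = _
      rw [pvInner_id _ _ 0 false hN]
      simp
  · rw [if_neg (by simpa using h2)]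
    exact h1

-- ===== VERDICT (by name: the statement is the Claim_ definition above) =====
theorem solution_spec : Claim_equal_solution := by
  intro s _
  unfold Spec_solution solution solution_alt
  rw [pvOuter_eq]
  have hfun : (fun (stack : List Char) (c : Char) =>
      let stack := stack ++ [c]
      if 2 ≤ stack.length then
        match PySem.List.pyGet? stack (-1), PySem.List.pyGet? stack (-2) with
        | some top1, some top2 => if top1 = top2 then stack.dropLast.dropLast else stack
        | _, _ => stack
      else stack) = stepS := funext fun st => funext fun c => stepA_eq st c
  rw [hfun]
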